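-- pv_equiv track=rewrite | github.com/twj-ink/2024fall | python_work/算法/DFS_BFS/sy_数字操作_318_bfs.py | bfs
-- ===== SOURCE A (Python) =====
-- from collections import deque
--
-- def bfs(n):
--     inq=set()
--     inq.add(1)
--     q=deque()
--     q.append((0,1)) #(step,front)
--     while q:
--         step,front=q.popleft()
--         if front==n:
--             return step
--         if front*2<=n and front*2 not in inq:
--             inq.add(front*2)
--             q.append((step+1,front*2))
--         if front+1<=n and front+1 not in inq:
--             inq.add(front+1)
--             q.append((step+1,front+1))
-- ===== SOURCE B (Python) =====
-- def bfs(n):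
--     # Work backward from n: halving (inverse of doubling) when even, else
--     # decrementing (inverse of +1), counting steps, is an optimal strategy,
--     # so the count equals the BFS shortest-path length. O(log n) vs O(n).
--     if n < 1:
--         return None
--     steps = 0
--     while n > 1:
--         if n % 2 == 0:
--             n //= 2
--         else:
--             n -= 1
--         steps += 1
--     return steps
-- ===== Notes on version B (the rewrite author's own statement) =====
-- stated objective: faster
-- what changed: Replaced the forward BFS that explores every value up to n with a backward greedy walk from n (halve when even, else decrement) that counts the steps.
import Mathlib
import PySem

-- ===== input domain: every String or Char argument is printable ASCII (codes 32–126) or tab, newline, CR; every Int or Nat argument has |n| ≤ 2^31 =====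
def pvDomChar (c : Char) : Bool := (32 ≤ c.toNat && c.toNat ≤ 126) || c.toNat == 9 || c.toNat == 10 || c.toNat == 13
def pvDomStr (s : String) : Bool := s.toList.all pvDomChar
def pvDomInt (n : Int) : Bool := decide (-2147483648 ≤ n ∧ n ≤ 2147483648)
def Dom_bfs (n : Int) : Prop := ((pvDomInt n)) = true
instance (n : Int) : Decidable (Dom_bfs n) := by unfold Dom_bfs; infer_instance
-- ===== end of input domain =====

-- B replaces A's forward BFS over all values ≤ n by a backward greedy walk from n
-- (halve when even, else decrement), counting steps: objective = faster.

-- ===== PORT A =====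
-- Literal port of A's BFS loop. The `while q` loop is driven by fuel; the fuel
-- n.toNat + 2 is proved sufficient below (each iteration pops one entry, and every
-- value is enqueued at most once), so no input in scope exhausts it.
def bfsLoop (n : Int) : Nat → List (Int × Int) → PySem.Set Int → Option Int
  | 0, _, _ => none
  | _ + 1, [], _ => none            -- while-loop exits with empty queue: Python returns None
  | fuel + 1, (step, front) :: rest, inq =>
    if front = n then some step
    else
      -- if front*2<=n and front*2 not in inq: inq.add(front*2); q.append((step+1,front*2))
      let s1 : List (Int × Int) × PySem.Set Int :=
        if front * 2 ≤ n ∧ front * 2 ∉ inq then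
          (rest ++ [(step + 1, front * 2)], PySem.Set.add inq (front * 2))
        else (rest, inq)
      -- if front+1<=n and front+1 not in inq: inq.add(front+1); q.append((step+1,front+1))
      let s2 : List (Int × Int) × PySem.Set Int :=
        if front + 1 ≤ n ∧ front + 1 ∉ s1.2 then
          (s1.1 ++ [(step + 1, front + 1)], PySem.Set.add s1.2 (front + 1))
        else s1
      bfsLoop n fuel s2.1 s2.2

def bfs (n : Int) : Option Int :=
  -- inq=set(); inq.add(1); q=deque(); q.append((0,1))
  bfsLoop n (n.toNat + 2) [(0, 1)] (PySem.Set.add (PySem.Set.ofList []) 1)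

-- ===== PORT B =====
-- steps = 0; while n > 1: halve if even else decrement; steps += 1
def bfsAltLoop (m : Int) (steps : Int) : Int :=
  if 1 < m then
    if PySem.Int.mod m 2 = 0 then bfsAltLoop (PySem.Int.floordiv m 2) (steps + 1)
    else bfsAltLoop (m - 1) (steps + 1)
  else steps
termination_by m.toNat
decreasing_by
  · simp only [PySem.Int.floordiv]
    rw [Int.fdiv_eq_ediv] <;> omega
  · omega

def bfs_alt (n : Int) : Option Int :=
  if n < 1 then none else some (bfsAltLoop n 0)

-- ===== PRECONDITION & SPEC =====
def Spec_bfs (n : Int) (out : Option Int) : Prop := out = bfs_alt n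
instance (n : Int) (out : Option Int) : Decidable (Spec_bfs n out) := by unfold Spec_bfs; infer_instance

-- ===== CLAIM (what is proved, stated in full; the proofs are below) =====
def Claim_equal_bfs : Prop := ∀ (n : Int), Dom_bfs n → Spec_bfs n (bfs n)

-- ===== LEMMAS AND PROOFS =====

-- `cost v` = number of backward greedy steps from v down to 1 (0 for v ≤ 1).
def cost (v : Int) : Nat :=
  if v ≤ 1 then 0
  else if v % 2 = 0 then cost (v / 2) + 1
  else cost (v - 1) + 1
termination_by v.toNat
decreasing_by
  · omega
  · omega

lemma cost_le_one {v : Int} (h : v ≤ 1) : cost v = 0 := by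
  rw [cost]; simp [h]

lemma cost_even {v : Int} (h2 : 2 ≤ v) (he : v % 2 = 0) : cost v = cost (v / 2) + 1 := by
  rw [cost]; rw [if_neg (by omega), if_pos he]

lemma cost_odd {v : Int} (h2 : 2 ≤ v) (ho : ¬ v % 2 = 0) : cost v = cost (v - 1) + 1 := by
  rw [cost]; rw [if_neg (by omega), if_neg ho]

lemma cost_pos {v : Int} (h2 : 2 ≤ v) : 1 ≤ cost v := by
  by_cases he : v % 2 = 0
  · rw [cost_even h2 he]; omega
  · rw [cost_odd h2 he]; omega

lemma cost_eq_zero {v : Int} (h1 : 1 ≤ v) (h : cost v = 0) : v = 1 := by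
  by_contra hne
  have h2 : 2 ≤ v := by omega
  have := cost_pos h2
  omega

lemma cost_double {v : Int} (h : 1 ≤ v) : cost (v * 2) = cost v + 1 := by
  have h2 : 2 ≤ v * 2 := by omega
  have he : (v * 2) % 2 = 0 := by omega
  rw [cost_even h2 he]
  congr 2
  omega

-- cost (v+1) ≤ cost v + 1: every value is at most one step harder than its predecessor.
lemma cost_succ_le_aux : ∀ (k : Nat) (v : Int), v.toNat ≤ k → 1 ≤ v → cost (v + 1) ≤ cost v + 1 := by
  intro k
  induction k with
  | zero => intro v hk hv; omega
  | succ k ih =>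
    intro v hk hv
    by_cases hv1 : v = 1
    · subst hv1
      rw [cost_even (by omega) (by omega)]
      have h22 : ((1 : Int) + 1) / 2 = 1 := by decide
      rw [h22]
    · have h2 : 2 ≤ v := by omega
      by_cases ho : (v + 1) % 2 = 0
      · -- v odd, v ≥ 3
        have hvodd : ¬ v % 2 = 0 := by omega
        have h3 : 3 ≤ v := by omega
        have hv1e : (v - 1) % 2 = 0 := by omega
        set w : Int := (v - 1) / 2 with hw
        have hw1 : 1 ≤ w := by omega
        have hwk : w.toNat ≤ k := by omega
        have e1 : cost (v + 1) = cost (w + 1) + 1 := by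
          rw [cost_even (by omega) ho]
          congr 2
          omega
        have e2 : cost v = cost (v - 1) + 1 := cost_odd h2 hvodd
        have e3 : cost (v - 1) = cost w + 1 := by
          rw [cost_even (by omega) hv1e]
        have := ih w hwk hw1
        omega
      · rw [cost_odd (by omega) ho]
        simp

lemma cost_succ_le {v : Int} (h : 1 ≤ v) : cost (v + 1) ≤ cost v + 1 :=
  cost_succ_le_aux v.toNat v le_rfl h

-- the backward greedy predecessor
def gpred (v : Int) : Int := if v % 2 = 0 then v / 2 else v - 1

lemma gpred_spec {v : Int} (h2 : 2 ≤ v) :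
    1 ≤ gpred v ∧ gpred v < v ∧ cost v = cost (gpred v) + 1 ∧
      (v = gpred v * 2 ∨ v = gpred v + 1) := by
  unfold gpred
  by_cases he : v % 2 = 0
  · rw [if_pos he]
    refine ⟨by omega, by omega, cost_even h2 he, Or.inl (by omega)⟩
  · rw [if_neg he]
    refine ⟨by omega, by omega, cost_odd h2 he, Or.inr (by omega)⟩

-- every level below cost v is inhabited (follow the greedy chain downward)
lemma level_nonempty_aux : ∀ (k : Nat) (v : Int), v.toNat ≤ k → 1 ≤ v →
    ∀ d : Nat, d ≤ cost v → ∃ u : Int, 1 ≤ u ∧ u ≤ v ∧ cost u = d := by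
  intro k
  induction k with
  | zero => intro v hk hv; omega
  | succ k ih =>
    intro v hk hv d hd
    rcases eq_or_lt_of_le hd with heq | hlt
    · exact ⟨v, hv, le_rfl, heq.symm⟩
    · have h2 : 2 ≤ v := by
        by_contra h
        have : v = 1 := by omega
        subst this
        rw [cost_le_one le_rfl] at hlt
        omega
      obtain ⟨hg1, hglt, hgc, _⟩ := gpred_spec h2
      obtain ⟨u, hu1, hu2, hu3⟩ := ih (gpred v) (by omega) hg1 d (by omega)
      exact ⟨u, hu1, by omega, hu3⟩

lemma level_nonempty {v : Int} (hv : 1 ≤ v) {d : Nat} (hd : d ≤ cost v) :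
    ∃ u : Int, 1 ≤ u ∧ u ≤ v ∧ cost u = d :=
  level_nonempty_aux v.toNat v le_rfl hv d hd

-- number of values in [1, n] not yet enqueued: the fuel budget of the loop
noncomputable def cmpl (n : Int) (inq : List Int) : Nat :=
  ((Finset.Icc 1 n).filter (fun v => v ∉ inq)).card

lemma cmpl_add {n : Int} {inq : List Int} {w : Int}
    (h1 : 1 ≤ w) (h2 : w ≤ n) (h3 : w ∉ inq) :
    cmpl n (PySem.Set.add inq w) + 1 = cmpl n inq := by
  unfold cmpl
  have hadd : PySem.Set.add inq w = inq ++ [w] := PySem.Set.add_of_not_mem h3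
  rw [hadd]
  have hset : (Finset.Icc 1 n).filter (fun v => v ∉ inq ++ [w]) =
      ((Finset.Icc 1 n).filter (fun v => v ∉ inq)).erase w := by
    ext v
    simp only [Finset.mem_filter, Finset.mem_erase, List.mem_append, List.mem_singleton,
      Finset.mem_Icc]
    constructor
    · rintro ⟨hv, hm⟩
      push_neg at hm
      exact ⟨hm.2, hv, hm.1⟩
    · rintro ⟨hne, hv, hm⟩
      push_neg
      exact ⟨hv, hm, hne⟩
  rw [hset]
  have hwmem : w ∈ (Finset.Icc 1 n).filter (fun v => v ∉ inq) := by
    simp only [Finset.mem_filter, Finset.mem_Icc]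
    exact ⟨⟨h1, h2⟩, h3⟩
  rw [Finset.card_erase_of_mem hwmem]
  have : 1 ≤ ((Finset.Icc 1 n).filter (fun v => v ∉ inq)).card :=
    Finset.card_pos.mpr ⟨w, hwmem⟩
  omega

lemma cmpl_le {n : Int} {inq : List Int} : cmpl n inq ≤ n.toNat := by
  unfold cmpl
  calc ((Finset.Icc 1 n).filter (fun v => v ∉ inq)).card
      ≤ (Finset.Icc (1 : Int) n).card := Finset.card_filter_le _ _
    _ = n.toNat := by rw [Int.card_Icc]; congr 1; omega

-- one-iteration equation for the loop (zeta-expanded form of the two lets)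
lemma bfsLoop_step (n : Int) (fuel : Nat) (st fr : Int) (rest : List (Int × Int))
    (inq : PySem.Set Int) (h : ¬ fr = n) :
    bfsLoop n (fuel + 1) ((st, fr) :: rest) inq =
      bfsLoop n fuel
        (if fr + 1 ≤ n ∧ fr + 1 ∉ (if fr * 2 ≤ n ∧ fr * 2 ∉ inq then PySem.Set.add inq (fr * 2) else inq)
          then (if fr * 2 ≤ n ∧ fr * 2 ∉ inq then rest ++ [(st + 1, fr * 2)] else rest) ++ [(st + 1, fr + 1)]
          else (if fr * 2 ≤ n ∧ fr * 2 ∉ inq then rest ++ [(st + 1, fr * 2)] else rest))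
        (if fr + 1 ≤ n ∧ fr + 1 ∉ (if fr * 2 ≤ n ∧ fr * 2 ∉ inq then PySem.Set.add inq (fr * 2) else inq)
          then PySem.Set.add (if fr * 2 ≤ n ∧ fr * 2 ∉ inq then PySem.Set.add inq (fr * 2) else inq) (fr + 1)
          else (if fr * 2 ≤ n ∧ fr * 2 ∉ inq then PySem.Set.add inq (fr * 2) else inq)) := by
  rw [bfsLoop, if_neg h]
  by_cases h1 : fr * 2 ≤ n ∧ fr * 2 ∉ inq
  · simp only [if_pos h1]
    split_ifs <;> rfl
  · simp only [if_neg h1]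
    split_ifs <;> rfl

-- the BFS loop invariant: the queue is A ++ B where A holds the remaining nodes of the
-- current level d and B the already-discovered nodes of level d+1; inq holds exactly
-- the values of cost ≤ d plus the fronts of B; every level-(d+1) value is either
-- discovered or its greedy predecessor is still waiting in A; n has not been dequeued.
structure BfsInv (n : Int) (d : Nat) (A B : List (Int × Int)) (inq : PySem.Set Int) : Prop where
  hA : ∀ p ∈ A, p.1 = (d : Int) ∧ cost p.2 = d ∧ 1 ≤ p.2 ∧ p.2 ≤ n
  hB : ∀ p ∈ B, p.1 = (d : Int) + 1 ∧ cost p.2 = d + 1 ∧ 1 ≤ p.2 ∧ p.2 ≤ n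
  hInq : ∀ v : Int, v ∈ inq ↔ (1 ≤ v ∧ v ≤ n ∧ (cost v ≤ d ∨ v ∈ B.map Prod.snd))
  hNext : ∀ v : Int, 1 ≤ v → v ≤ n → cost v = d + 1 →
    (v ∈ B.map Prod.snd ∨ gpred v ∈ A.map Prod.snd)
  hNA : cost n = d → n ∈ A.map Prod.snd
  hdN : d ≤ cost n

-- effect of one conditional append ("if w<=n and w not in inq: add & enqueue")
lemma append_one (n : Int) (d : Nat) (u w : Int) (B : List (Int × Int)) (inq : PySem.Set Int)
    (hu1 : 1 ≤ u) (hcu : cost u = d)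
    (hw : w = u * 2 ∨ w = u + 1)
    (hB : ∀ p ∈ B, p.1 = (d : Int) + 1 ∧ cost p.2 = d + 1 ∧ 1 ≤ p.2 ∧ p.2 ≤ n)
    (hInq : ∀ v : Int, v ∈ inq ↔ (1 ≤ v ∧ v ≤ n ∧ (cost v ≤ d ∨ v ∈ B.map Prod.snd))) :
    (∀ p ∈ (if w ≤ n ∧ w ∉ inq then B ++ [((d : Int) + 1, w)] else B),
        p.1 = (d : Int) + 1 ∧ cost p.2 = d + 1 ∧ 1 ≤ p.2 ∧ p.2 ≤ n) ∧
    (∀ v : Int, v ∈ (if w ≤ n ∧ w ∉ inq then PySem.Set.add inq w else inq) ↔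
        (1 ≤ v ∧ v ≤ n ∧ (cost v ≤ d ∨
          v ∈ (if w ≤ n ∧ w ∉ inq then B ++ [((d : Int) + 1, w)] else B).map Prod.snd))) ∧
    ((if w ≤ n ∧ w ∉ inq then B ++ [((d : Int) + 1, w)] else B).length +
        cmpl n (if w ≤ n ∧ w ∉ inq then PySem.Set.add inq w else inq) =
      B.length + cmpl n inq) ∧
    (w ≤ n → w ∈ (if w ≤ n ∧ w ∉ inq then PySem.Set.add inq w else inq)) := by
  have hw1 : 1 ≤ w := by rcases hw with h | h <;> omega
  have hwc : cost w ≤ d + 1 := by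
    rcases hw with h | h
    · subst h; rw [cost_double hu1]; omega
    · subst h; have := cost_succ_le hu1; omega
  by_cases hP : w ≤ n ∧ w ∉ inq
  · have hwnew : ¬ (cost w ≤ d ∨ w ∈ B.map Prod.snd) := by
      intro hc
      exact hP.2 ((hInq w).mpr ⟨hw1, hP.1, hc⟩)
    push_neg at hwnew
    have hwcost : cost w = d + 1 := by omega
    simp only [if_pos hP]
    refine ⟨?_, ?_, ?_, ?_⟩
    · intro p hp
      rcases List.mem_append.mp hp with hp | hp
      · exact hB p hp
      · simp only [List.mem_singleton] at hp
        subst hp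
        exact ⟨rfl, hwcost, hw1, hP.1⟩
    · intro v
      rw [PySem.Set.mem_add, hInq v]
      simp only [List.map_append, List.map_cons, List.map_nil, List.mem_append,
        List.mem_singleton]
      constructor
      · rintro (⟨h1, h2, h3⟩ | rfl)
        · exact ⟨h1, h2, by tauto⟩
        · exact ⟨hw1, hP.1, Or.inr (Or.inr rfl)⟩
      · rintro ⟨h1, h2, (h3 | h3 | rfl)⟩
        · exact Or.inl ⟨h1, h2, Or.inl h3⟩
        · exact Or.inl ⟨h1, h2, Or.inr h3⟩
        · exact Or.inr rfl
    · have := cmpl_add hw1 hP.1 hP.2 (inq := inq)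
      simp only [List.length_append, List.length_singleton]
      omega
    · intro hwn
      rw [PySem.Set.mem_add]
      exact Or.inr rfl
  · simp only [if_neg hP]
    refine ⟨hB, hInq, by trivial, ?_⟩
    intro hwn
    have : w ∈ inq := by
      by_contra h
      exact hP ⟨hwn, h⟩
    exact this

-- pushing A' out of the two conditional appends
lemma queue_reshape (c1 c2 : Prop) [Decidable c1] [Decidable c2]
    (A B : List (Int × Int)) (x y : Int × Int) :
    (if c2 then (if c1 then (A ++ B) ++ [x] else A ++ B) ++ [y]
      else (if c1 then (A ++ B) ++ [x] else A ++ B)) =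
      A ++ (if c2 then (if c1 then B ++ [x] else B) ++ [y] else (if c1 then B ++ [x] else B)) := by
  split_ifs <;> simp [List.append_assoc]

-- the main loop lemma: under the invariant and with enough fuel, the BFS returns cost n
lemma bfs_loop_correct (n : Int) (hn : 1 ≤ n) :
    ∀ (k f d : Nat) (A B : List (Int × Int)) (inq : PySem.Set Int),
      f + (cost n + 1 - d) ≤ k →
      BfsInv n d A B inq →
      (A ++ B).length + cmpl n inq < f →
      bfsLoop n f (A ++ B) inq = some ((cost n : Int)) := by
  intro k
  induction k with
  | zero => intro f d A B inq hk _ hf; omega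
  | succ k ih =>
    intro f d A B inq hk inv hf
    match A with
    | [] =>
      match B with
      | [] =>
        exfalso
        rcases eq_or_lt_of_le inv.hdN with heq | hlt
        · have := inv.hNA heq.symm
          simp at this
        · obtain ⟨u, hu1, hu2, hu3⟩ := level_nonempty hn (d := d + 1) (by omega)
          rcases inv.hNext u hu1 hu2 hu3 with h | h <;> simp at h
      | b :: B' =>
        have hdne : cost n ≠ d := by
          intro heq
          have := inv.hNA heq
          simp at this
        have hdlt : d < cost n := lt_of_le_of_ne inv.hdN (Ne.symm hdne)
        have inv' : BfsInv n (d + 1) (b :: B') [] inq := by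
          refine ⟨?_, ?_, ?_, ?_, ?_, ?_⟩
          · intro p hp
            have := inv.hB p hp
            refine ⟨by push_cast; omega, by omega, this.2.2⟩
          · intro p hp; simp at hp
          · intro v
            rw [inv.hInq v]
            simp only [List.map_nil, List.not_mem_nil, or_false]
            constructor
            · rintro ⟨h1, h2, h3 | h3⟩
              · exact ⟨h1, h2, by omega⟩
              · have hcv : cost v = d + 1 := by
                  simp only [List.mem_map] at h3
                  obtain ⟨p, hp, hpv⟩ := h3
                  rw [← hpv]
                  exact (inv.hB p hp).2.1
                exact ⟨h1, h2, by omega⟩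
            · rintro ⟨h1, h2, h3⟩
              rcases Nat.lt_or_ge (cost v) (d + 1) with h | h
              · exact ⟨h1, h2, Or.inl (by omega)⟩
              · have hveq : cost v = d + 1 := by omega
                rcases inv.hNext v h1 h2 hveq with hm | hm
                · exact ⟨h1, h2, Or.inr hm⟩
                · simp at hm
          · intro v h1 h2 h3
            right
            have h2v : 2 ≤ v := by
              by_contra h
              have : v = 1 := by omega
              subst this
              rw [cost_le_one le_rfl] at h3
              omega
            obtain ⟨hg1, hglt, hgc, _⟩ := gpred_spec h2v
            have hgcost : cost (gpred v) = d + 1 := by omega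
            rcases inv.hNext (gpred v) hg1 (by omega) hgcost with hm | hm
            · exact hm
            · simp at hm
          · intro heq
            rcases inv.hNext n hn le_rfl heq with hm | hm
            · exact hm
            · simp at hm
          · omega
        have := ih f (d + 1) (b :: B') [] inq (by omega) inv' (by simpa using hf)
        simpa using this
    | (s, u) :: A' =>
      match f with
      | 0 => omega
      | f' + 1 =>
        obtain ⟨hs, hcu, hu1, hun⟩ := inv.hA (s, u) (List.mem_cons_self)
        subst hs
        by_cases hu : u = n
        · rw [List.cons_append, bfsLoop, if_pos hu]
          congr 1
          have : cost n = d := hu ▸ hcu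
          omega
        · rw [List.cons_append, bfsLoop_step n f' ((d : Nat) : Int) u (A' ++ B) inq hu]
          obtain ⟨hB1, hInq1, hcnt1, hmem1⟩ :=
            append_one n d u (u * 2) B inq hu1 hcu (Or.inl rfl) inv.hB inv.hInq
          set B1 := (if u * 2 ≤ n ∧ u * 2 ∉ inq then B ++ [((d : Int) + 1, u * 2)] else B)
            with hB1def
          set inq1 := (if u * 2 ≤ n ∧ u * 2 ∉ inq then PySem.Set.add inq (u * 2) else inq)
            with hinq1def
          obtain ⟨hB2, hInq2, hcnt2, hmem2⟩ :=
            append_one n d u (u + 1) B1 inq1 hu1 hcu (Or.inr rfl) hB1 hInq1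
          set B2 := (if u + 1 ≤ n ∧ u + 1 ∉ inq1 then B1 ++ [((d : Int) + 1, u + 1)] else B1)
            with hB2def
          set inq2 := (if u + 1 ≤ n ∧ u + 1 ∉ inq1 then PySem.Set.add inq1 (u + 1) else inq1)
            with hinq2def
          rw [queue_reshape (u * 2 ≤ n ∧ u * 2 ∉ inq) (u + 1 ≤ n ∧ u + 1 ∉ inq1)
            A' B (((d : Int)) + 1, u * 2) (((d : Int)) + 1, u + 1), ← hB1def, ← hB2def]
          have hBsub1 : ∀ v : Int, v ∈ B.map Prod.snd → v ∈ B1.map Prod.snd := by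
            intro v hv
            rw [hB1def]
            split_ifs with h
            · simp only [List.map_append, List.mem_append]
              exact Or.inl hv
            · exact hv
          have hB1sub : ∀ v : Int, v ∈ B1.map Prod.snd → v ∈ B2.map Prod.snd := by
            intro v hv
            rw [hB2def]
            split_ifs with h
            · simp only [List.map_append, List.mem_append]
              exact Or.inl hv
            · exact hv
          have hBsub : ∀ v : Int, v ∈ B.map Prod.snd → v ∈ B2.map Prod.snd :=
            fun v hv => hB1sub v (hBsub1 v hv)
          have hinqsub : ∀ v : Int, v ∈ inq1 → v ∈ inq2 := by
            intro v hv
            rw [hInq1 v] at hv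
            rw [hInq2 v]
            refine ⟨hv.1, hv.2.1, ?_⟩
            rcases hv.2.2 with h | h
            · exact Or.inl h
            · exact Or.inr (hB1sub v h)
          have inv' : BfsInv n d A' B2 inq2 := by
            refine ⟨?_, hB2, hInq2, ?_, ?_, inv.hdN⟩
            · intro p hp; exact inv.hA p (List.mem_cons_of_mem _ hp)
            · intro v h1 h2 h3
              rcases inv.hNext v h1 h2 h3 with hm | hm
              · exact Or.inl (hBsub v hm)
              · simp only [List.map_cons, List.mem_cons] at hm
                rcases hm with hm | hm
                · -- gpred v = u: v was discovered while processing u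
                  left
                  by_cases hve : v % 2 = 0
                  · have hveq : v = u * 2 := by
                      unfold gpred at hm
                      rw [if_pos hve] at hm
                      omega
                    subst hveq
                    have hv2 : u * 2 ∈ inq2 := hinqsub _ (hmem1 (by omega))
                    rw [hInq2 (u * 2)] at hv2
                    rcases hv2.2.2 with h | h
                    · omega
                    · exact h
                  · have hveq : v = u + 1 := by
                      unfold gpred at hm
                      rw [if_neg hve] at hm
                      omega
                    have : v ∈ inq2 := by
                      subst hveq
                      exact hmem2 (by omega)
                    rw [hInq2 v] at this
                    rcases this.2.2 with h | h
                    · omega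
                    · exact h
                · exact Or.inr hm
            · intro heq
              have := inv.hNA heq
              simp only [List.map_cons, List.mem_cons] at this
              rcases this with h | h
              · exact absurd h.symm hu
              · exact h
          have hcount : (A' ++ B2).length + cmpl n inq2 < f' := by
            simp only [List.length_append] at hf ⊢
            simp only [List.cons_append, List.length_cons, List.length_append] at hf
            omega
          exact ih f' d A' B2 inq2 (by omega) inv' hcount

-- B's loop computes cost
lemma altLoop_eq_cost : ∀ (k : Nat) (m s : Int), m.toNat ≤ k →
    bfsAltLoop m s = s + (cost m : Int) := by
  intro k
  induction k with
  | zero =>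
    intro m s hk
    rw [bfsAltLoop]
    rw [if_neg (by omega), cost_le_one (by omega)]
    simp
  | succ k ih =>
    intro m s hk
    rw [bfsAltLoop]
    by_cases hm : 1 < m
    · rw [if_pos hm]
      have hmod : PySem.Int.mod m 2 = m % 2 := by
        simp only [PySem.Int.mod]
        rw [Int.fmod_eq_emod_of_nonneg]
        omega
      have hdiv : PySem.Int.floordiv m 2 = m / 2 := by
        simp only [PySem.Int.floordiv]
        rw [Int.fdiv_eq_ediv]
        omega
      by_cases he : m % 2 = 0
      · rw [if_pos (by rw [hmod]; exact he), hdiv]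
        rw [ih (m / 2) (s + 1) (by omega)]
        rw [cost_even (by omega) he]
        push_cast
        ring
      · rw [if_neg (by rw [hmod]; exact he)]
        rw [ih (m - 1) (s + 1) (by omega)]
        rw [cost_odd (by omega) he]
        push_cast
        ring
    · rw [if_neg hm, cost_le_one (by omega)]
      simp

-- the initial state satisfies the invariant
lemma bfs_init_inv {n : Int} (hn : 1 ≤ n) :
    BfsInv n 0 [((0 : Int), (1 : Int))] [] (PySem.Set.add (PySem.Set.ofList []) 1) := by
  have hmem0 : ∀ v : Int, v ∈ PySem.Set.add (PySem.Set.ofList []) 1 ↔ v = 1 := by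
    intro v
    rw [PySem.Set.mem_add]
    simp [PySem.Set.ofList]
  refine ⟨?_, ?_, ?_, ?_, ?_, ?_⟩
  · intro p hp
    simp only [List.mem_singleton] at hp
    subst hp
    exact ⟨rfl, cost_le_one le_rfl, le_rfl, hn⟩
  · intro p hp; simp at hp
  · intro v
    rw [hmem0 v]
    simp only [List.map_nil, List.not_mem_nil, or_false]
    constructor
    · rintro rfl
      exact ⟨le_rfl, hn, by rw [cost_le_one le_rfl]⟩
    · rintro ⟨h1, h2, h3⟩
      exact cost_eq_zero h1 (by omega)
  · intro v h1 h2 h3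
    right
    have h2v : 2 ≤ v := by
      by_contra h
      have : v = 1 := by omega
      subst this
      rw [cost_le_one le_rfl] at h3
      omega
    obtain ⟨hg1, _, hgc, _⟩ := gpred_spec h2v
    have : cost (gpred v) = 0 := by omega
    have := cost_eq_zero hg1 this
    simp [this]
  · intro heq
    have := cost_eq_zero hn heq
    simp [this]
  · omega

-- ===== VERDICT (by name: the statement is the Claim_ definition above) =====
theorem bfs_spec : Claim_equal_bfs := by
  intro n _
  unfold Spec_bfs bfs bfs_alt
  by_cases hn : n < 1
  · rw [if_pos hn]
    have ht : n.toNat + 2 = 1 + 1 := by omega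
    rw [ht]
    rw [bfsLoop_step n 1 0 1 [] (PySem.Set.add (PySem.Set.ofList []) 1) (by omega)]
    have h1 : ¬ ((1 : Int) * 2 ≤ n ∧ (1 : Int) * 2 ∉ PySem.Set.add (PySem.Set.ofList []) 1) := by
      rintro ⟨h, -⟩; omega
    simp only [if_neg h1]
    have h2 : ¬ ((1 : Int) + 1 ≤ n ∧ (1 : Int) + 1 ∉ PySem.Set.add (PySem.Set.ofList []) 1) := by
      rintro ⟨h, -⟩; omega
    simp only [if_neg h2]
    rw [bfsLoop]
  · push_neg at hn
    rw [if_neg (by omega)]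
    rw [altLoop_eq_cost n.toNat n 0 le_rfl]
    have := bfs_loop_correct n hn ((n.toNat + 2) + (cost n + 1)) (n.toNat + 2) 0
      [((0 : Int), (1 : Int))] [] (PySem.Set.add (PySem.Set.ofList []) 1)
      (by omega) (bfs_init_inv hn) ?_
    · simpa using this
    · have := cmpl_le (n := n) (inq := PySem.Set.add (PySem.Set.ofList []) 1)
      simp only [List.append_nil, List.length_singleton]
      omega
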